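-- pv_equiv track=rewrite | github.com/matthematics/schubmult | src/schubmult/schub_lib/root_tableau.py | _plactic_raising_operator
-- ===== SOURCE A (Python) =====
-- def _plactic_raising_operator(word, i):
--     word = [*word]
--     opening_stack = []
--     closing_stack = []
--     for index in range(len(word)):
--         if word[index] == i + 1:
--             opening_stack.append(index)
--         elif word[index] == i:
--             if len(opening_stack) > 0:
--                 opening_stack.pop()
--             else:
--                 closing_stack.append(index)
--     if len(opening_stack) == 0:
--         return None
--     index_to_change = opening_stack[0]
--     word[index_to_change] = i
--     return tuple(word)
-- ===== SOURCE B (Python) =====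
-- def _plactic_raising_operator(word, i):
--     word = list(word)
--     avail = 0
--     unmatched = None
--     for index in range(len(word) - 1, -1, -1):
--         x = word[index]
--         if x == i:
--             avail += 1
--         elif x == i + 1:
--             if avail > 0:
--                 avail -= 1
--             else:
--                 unmatched = index
--     if unmatched is None:
--         return None
--     word[unmatched] = i
--     return tuple(word)
-- ===== Notes on version B (the rewrite author's own statement) =====
-- stated objective: alternative
-- what changed: Replaces the left-to-right index-stack bracket matching (push unmatched i+1 indices, i pops) with a single right-to-left scan keeping only an integer counter of available i's and the latest unmatched i+1 index, so no stacks are built.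
import Mathlib
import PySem

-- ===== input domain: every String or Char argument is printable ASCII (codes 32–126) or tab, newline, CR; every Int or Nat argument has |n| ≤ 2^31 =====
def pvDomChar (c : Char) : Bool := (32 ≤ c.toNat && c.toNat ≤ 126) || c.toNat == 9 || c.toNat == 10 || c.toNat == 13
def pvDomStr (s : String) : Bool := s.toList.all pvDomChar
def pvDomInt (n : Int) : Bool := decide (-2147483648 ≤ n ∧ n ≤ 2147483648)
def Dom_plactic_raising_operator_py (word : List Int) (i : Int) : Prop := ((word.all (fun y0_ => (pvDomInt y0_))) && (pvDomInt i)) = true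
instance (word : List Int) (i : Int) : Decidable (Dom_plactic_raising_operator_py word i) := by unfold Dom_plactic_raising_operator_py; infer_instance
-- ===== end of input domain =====

-- B replaces A's left-to-right stack of unmatched i+1 indices by a right-to-left scan
-- with an integer counter of available i's; same return value, no stacks ("alternative").

-- ===== PORT A =====
-- the for loop over range(len(word)): structural recursion over word carrying the index
-- (word[index] is exactly the element at position idx, always in range)
def pvALoop (i : Int) (idx : Nat) (op cl : List Nat) : List Int → List Nat × List Nat
  | [] => (op, cl)
  | x :: rest =>
    if x = i + 1 then pvALoop i (idx + 1) (op ++ [idx]) cl rest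
    else if x = i then
      if op.length > 0 then pvALoop i (idx + 1) op.dropLast cl rest
      else pvALoop i (idx + 1) op (cl ++ [idx]) rest
    else pvALoop i (idx + 1) op cl rest

def plactic_raising_operator_py (word : List Int) (i : Int) : Option (List Int) :=
  match (pvALoop i 0 [] [] word).1 with
  | [] => none                         -- len(opening_stack) == 0 → None
  | j :: _ => some (word.set j i)      -- index_to_change = opening_stack[0]; word[j] = i

-- ===== PORT B =====
-- the for loop over range(len(word)-1, -1, -1): recursion that processes the tail
-- (the suffix to the right) first, then the head — i.e. the same right-to-left order;
-- the head, processed last, overwrites `unmatched` exactly as the Python loop does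
def pvBScan (i : Int) (idx : Nat) : List Int → Nat × Option Nat
  | [] => (0, none)
  | x :: rest =>
    let s := pvBScan i (idx + 1) rest
    if x = i then (s.1 + 1, s.2)
    else if x = i + 1 then
      if s.1 > 0 then (s.1 - 1, s.2) else (s.1, some idx)
    else s

def plactic_raising_operator_py_alt (word : List Int) (i : Int) : Option (List Int) :=
  match (pvBScan i 0 word).2 with
  | none => none
  | some j => some (word.set j i)

-- ===== PRECONDITION & SPEC =====
def Spec_plactic_raising_operator_py (word : List Int) (i : Int) (out : Option (List Int)) : Prop := out = plactic_raising_operator_py_alt word i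
instance (word : List Int) (i : Int) (out : Option (List Int)) : Decidable (Spec_plactic_raising_operator_py word i out) := by unfold Spec_plactic_raising_operator_py; infer_instance

-- ===== CLAIM (what is proved, stated in full; the proofs are below) =====
def Claim_equal_plactic_raising_operator_py : Prop := ∀ (word : List Int) (i : Int), Dom_plactic_raising_operator_py word i → Spec_plactic_raising_operator_py word i (plactic_raising_operator_py word i)

-- ===== LEMMAS AND PROOFS =====

-- proof-only: the list of unmatched i+1 indices, in increasing position order
def pvU (i : Int) (idx : Nat) : List Int → List Nat
  | [] => []
  | x :: rest =>
    if x = i + 1 ∧ (pvBScan i (idx + 1) rest).1 = 0 then idx :: pvU i (idx + 1) rest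
    else pvU i (idx + 1) rest

-- B's recorded index is the first unmatched opening
theorem pvBScan_snd_eq (i : Int) (idx : Nat) (w : List Int) :
    (pvBScan i idx w).2 = (pvU i idx w).head? := by
  induction w generalizing idx with
  | nil => rfl
  | cons x rest ih =>
    simp only [pvBScan, pvU]
    by_cases hxi : x = i
    · have : ¬ (x = i + 1) := by omega
      simp [hxi, this, ih]
    · by_cases hx1 : x = i + 1
      · by_cases ha : (pvBScan i (idx + 1) rest).1 > 0
        · have : ¬ ((pvBScan i (idx + 1) rest).1 = 0) := by omega
          simp [hxi, hx1, ha, this, ih]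
        · have h0 : (pvBScan i (idx + 1) rest).1 = 0 := by omega
          simp [hxi, hx1, ha, h0]
      · simp [hxi, hx1, ih]

-- A's final opening stack, started from any stack `op`: the i's of `w` that find no
-- opening of `w` on the stack eat into `op` from the top (their number is B's counter),
-- and the unmatched openings of `w` are appended
theorem pvALoop_eq (i : Int) (w : List Int) : ∀ (idx : Nat) (op cl : List Nat),
    (pvALoop i idx op cl w).1 =
      op.take (op.length - (pvBScan i idx w).1) ++ pvU i idx w := by
  induction w with
  | nil => intro idx op cl; simp [pvALoop, pvBScan, pvU]
  | cons x rest ih =>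
    intro idx op cl
    simp only [pvALoop, pvBScan, pvU]
    by_cases hx1 : x = i + 1
    · have hxi : ¬ (x = i) := by omega
      by_cases ha : (pvBScan i (idx + 1) rest).1 > 0
      · have h0 : ¬ ((pvBScan i (idx + 1) rest).1 = 0) := by omega
        simp only [hx1, if_pos, ih, ha, if_true, h0, false_and, if_false, if_neg]
        congr 1
        rw [List.take_append_of_le_length (by simp; omega)]
        congr 1
        simp
        omega
      · have h0 : (pvBScan i (idx + 1) rest).1 = 0 := by omega
        simp only [hx1, if_pos, ih, ha, if_false, h0, and_self, if_true, true_and]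
        rw [List.take_of_length_le (by simp)]
        simp
    · by_cases hxi : x = i
      · by_cases hop : op.length > 0
        · have hii : ¬ (i = i + 1) := by omega
          simp only [hx1, hxi, hop, hii, if_pos, if_neg, not_false_iff, if_true,
            false_and, if_false, ih, List.length_take, List.length_dropLast]
          congr 1
          rw [List.dropLast_eq_take, List.take_take]
          congr 1
          omega
        · have hop0 : op = [] := by
            cases op with | nil => rfl | cons a l => simp at hop
          simp [hop0, ih, hxi, hx1]
      · simp [hx1, hxi, ih]

-- ===== VERDICT (by name: the statement is the Claim_ definition above) =====
theorem plactic_raising_operator_py_spec : Claim_equal_plactic_raising_operator_py := by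
  intro word i _
  unfold Spec_plactic_raising_operator_py
  unfold plactic_raising_operator_py plactic_raising_operator_py_alt
  rw [pvBScan_snd_eq]
  have h := pvALoop_eq i word 0 [] []
  simp only [List.take_nil, List.nil_append] at h
  rw [h]
  cases hU : pvU i 0 word with
  | nil => simp [hU]
  | cons j rest => simp [hU]
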